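-- pv_equiv track=rewrite | github.com/TheDarkLightX/ZenoDEX | tools/recommended_tau_smoke.py | normalize_spec_text
-- ===== SOURCE A (Python) =====
-- def normalize_spec_text(text: str) -> str:
--     """Strip comments and collapse multi-line always blocks for REPL harness."""
--     lines = []
--     raw = text.splitlines()
--     i = 0
--     while i < len(raw):
--         line = raw[i]
--         stripped = line.strip()
--         if not stripped or stripped.startswith("#"):
--             i += 1
--             continue
--         if stripped.startswith("set charvar"):
--             i += 1
--             continue
--         if stripped.startswith("always"):
--             expr_parts = []
--             tail = stripped[len("always"):].strip()
--             if tail: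
--                 expr_parts.append(tail)
--             i += 1
--             while i < len(raw):
--                 nxt = raw[i].strip()
--                 if not nxt or nxt.startswith("#"):
--                     i += 1
--                     continue
--                 expr_parts.append(nxt)
--                 if nxt.endswith("."):
--                     break
--                 i += 1
--             joined = " ".join(expr_parts)
--             if joined.endswith("."):
--                 joined = joined[:-1]
--             lines.append(f"always {joined}.")
--             i += 1
--             continue
--         lines.append(stripped)
--         i += 1
--     return "\n".join(lines) + "\n"
-- ===== SOURCE B (Python) =====
-- def normalize_spec_text(text: str) -> str:
--     """Strip comments and collapse multi-line always blocks for REPL harness."""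
--     lines = []
--     in_always = False
--     parts = []
--
--     def flush():
--         joined = " ".join(parts)
--         if joined.endswith("."):
--             joined = joined[:-1]
--         lines.append(f"always {joined}.")
--
--     for raw_line in text.splitlines():
--         s = raw_line.strip()
--         if in_always:
--             if not s or s.startswith("#"):
--                 continue
--             parts.append(s)
--             if s.endswith("."):
--                 flush()
--                 in_always = False
--                 parts = []
--         else:
--             if not s or s.startswith("#") or s.startswith("set charvar"):
--                 continue
--             if s.startswith("always"):
--                 in_always = True
--                 parts = []
--                 tail = s[len("always"):].strip()
--                 if tail:
--                     parts.append(tail)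
--             else:
--                 lines.append(s)
--     if in_always:
--         flush()
--     return "\n".join(lines) + "\n"
-- ===== Notes on version B (the rewrite author's own statement) =====
-- stated objective: simpler
-- what changed: Replaces A's index-driven outer while-loop with a nested inner while-loop (and manual i bookkeeping) by a single flat for-loop state machine over the lines, carrying an in_always flag and a parts accumulator, with one final flush after the loop.
import Mathlib
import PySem

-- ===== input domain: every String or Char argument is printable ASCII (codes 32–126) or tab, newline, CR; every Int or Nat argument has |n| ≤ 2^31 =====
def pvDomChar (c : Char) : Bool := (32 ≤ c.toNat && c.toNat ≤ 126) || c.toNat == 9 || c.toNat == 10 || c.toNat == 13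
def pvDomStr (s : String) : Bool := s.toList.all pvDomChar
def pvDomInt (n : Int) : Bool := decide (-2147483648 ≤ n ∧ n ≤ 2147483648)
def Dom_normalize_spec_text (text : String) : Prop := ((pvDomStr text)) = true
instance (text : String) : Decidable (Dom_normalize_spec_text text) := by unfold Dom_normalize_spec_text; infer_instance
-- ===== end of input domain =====

-- B replaces A's outer-while-with-nested-inner-while (manual index bookkeeping) by one flat
-- single-pass state machine (in_always flag + parts accumulator, one final flush): simpler.

-- ===== PORT A =====
-- inner `while i < len(raw)` of the `always` branch (the position i is rendered as the
-- remaining suffix of raw); returns (expr_parts, suffix after the break line)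
def pvA_inner (rem : List String) (parts : List String) : List String × List String :=
  match rem with
  | [] => (parts, [])
  | l :: rest =>
    let nxt := PySem.Str.strip l
    if nxt = "" ∨ PySem.Str.startswith nxt "#" then
      pvA_inner rest parts
    else
      let parts := parts ++ [nxt]
      if PySem.Str.endswith nxt "." then (parts, rest)
      else pvA_inner rest parts

-- the inner loop only consumes input (cited by pvA_outer's decreasing_by)
theorem pvA_inner_len (rem : List String) (parts : List String) :
    (pvA_inner rem parts).2.length ≤ rem.length := by
  induction rem generalizing parts with
  | nil => exact Nat.le_refl 0
  | cons l rest ih =>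
    simp only [pvA_inner]
    split
    · exact Nat.le_succ_of_le (ih parts)
    · split
      · exact Nat.le_succ rest.length
      · exact Nat.le_succ_of_le (ih _)

-- outer `while i < len(raw)` (again over the remaining suffix of raw)
def pvA_outer (rem : List String) (lines : List String) : List String :=
  match rem with
  | [] => lines
  | l :: rest =>
    let stripped := PySem.Str.strip l
    if stripped = "" ∨ PySem.Str.startswith stripped "#" then
      pvA_outer rest lines
    else if PySem.Str.startswith stripped "set charvar" then
      pvA_outer rest lines
    else if PySem.Str.startswith stripped "always" then
      let tail := PySem.Str.strip (PySem.Str.slice stripped (some 6) none)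
      let parts0 := if tail ≠ "" then [tail] else []
      let r := pvA_inner rest parts0
      let joined := PySem.Str.join " " r.1
      let joined := if PySem.Str.endswith joined "." then PySem.Str.slice joined none (some (-1)) else joined
      pvA_outer r.2 (lines ++ ["always " ++ joined ++ "."])
    else
      pvA_outer rest (lines ++ [stripped])
termination_by rem.length
decreasing_by
  · simp
  · simp
  · have h2 := pvA_inner_len rest parts0
    simp only [parts0, tail, stripped, List.length_cons] at h2 ⊢
    omega
  · simp

def normalize_spec_text (text : String) : String :=
  PySem.Str.join "\n" (pvA_outer (PySem.Str.splitlines text) []) ++ "\n"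

-- ===== PORT B =====
-- B's flush(): join the parts, drop one trailing '.', wrap as an always line
def pvFlushB (parts : List String) : String :=
  let joined := PySem.Str.join " " parts
  let joined := if PySem.Str.endswith joined "." then PySem.Str.slice joined none (some (-1)) else joined
  "always " ++ joined ++ "."

-- one step of B's `for raw_line in text.splitlines()` loop; state = (lines, in_always, parts)
def pvB_step (st : List String × Bool × List String) (raw_line : String) :
    List String × Bool × List String :=
  let s := PySem.Str.strip raw_line
  if st.2.1 then
    if s = "" ∨ PySem.Str.startswith s "#" then st
    else
      let parts := st.2.2 ++ [s]
      if PySem.Str.endswith s "." then (st.1 ++ [pvFlushB parts], false, [])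
      else (st.1, true, parts)
  else
    if s = "" ∨ PySem.Str.startswith s "#" ∨ PySem.Str.startswith s "set charvar" then st
    else if PySem.Str.startswith s "always" then
      let tail := PySem.Str.strip (PySem.Str.slice s (some 6) none)
      (st.1, true, if tail ≠ "" then [tail] else [])
    else (st.1 ++ [s], st.2.1, st.2.2)

def normalize_spec_text_alt (text : String) : String :=
  let st := (PySem.Str.splitlines text).foldl pvB_step ([], false, [])
  let lines := if st.2.1 then st.1 ++ [pvFlushB st.2.2] else st.1
  PySem.Str.join "\n" lines ++ "\n"

-- ===== PRECONDITION & SPEC =====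
def Spec_normalize_spec_text (text : String) (out : String) : Prop := out = normalize_spec_text_alt text
instance (text : String) (out : String) : Decidable (Spec_normalize_spec_text text out) := by unfold Spec_normalize_spec_text; infer_instance

-- ===== CLAIM (what is proved, stated in full; the proofs are below) =====
def Claim_equal_normalize_spec_text : Prop := ∀ (text : String), Dom_normalize_spec_text text → Spec_normalize_spec_text text (normalize_spec_text text)

-- ===== LEMMAS AND PROOFS =====

-- B's post-loop finalization, as a function of the fold state
def pvFin (st : List String × Bool × List String) : List String :=
  if st.2.1 then st.1 ++ [pvFlushB st.2.2] else st.1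

-- Main invariant: from any remaining suffix, A's remaining work (in either mode: outside
-- an always block, or inside one with accumulated parts) equals B's fold over the
-- remaining lines followed by B's final flush.
theorem pvMain (fuel : Nat) :
    ∀ (rem lines parts : List String) (flag : Bool), rem.length ≤ fuel →
    (if flag then
       pvA_outer (pvA_inner rem parts).2 (lines ++ [pvFlushB (pvA_inner rem parts).1])
     else pvA_outer rem lines)
    = pvFin (rem.foldl pvB_step (lines, flag, parts)) := by
  induction fuel with
  | zero =>
    intro rem lines parts flag hf
    match rem with
    | [] =>
      cases flag with
      | false => simp [pvA_outer, pvFin]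
      | true => simp [pvA_inner, pvA_outer, pvFin]
    | l :: rest => simp at hf
  | succ fuel ih =>
    intro rem lines parts flag hf
    match rem with
    | [] =>
      cases flag with
      | false => simp [pvA_outer, pvFin]
      | true => simp [pvA_inner, pvA_outer, pvFin]
    | l :: rest =>
      rw [List.foldl_cons]
      have hr : rest.length ≤ fuel := by simp at hf; omega
      cases flag with
      | true =>
        simp only [pvA_inner, pvB_step]
        by_cases h1 : PySem.Str.strip l = "" ∨ PySem.Str.startswith (PySem.Str.strip l) "#"
        · simp only [if_pos h1]
          simpa only [if_pos rfl] using ih rest lines parts true hr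
        · simp only [if_neg h1]
          by_cases h2 : PySem.Str.endswith (PySem.Str.strip l) "."
          · simp only [if_pos h2]
            simpa only [if_neg (by simp : ¬ (false = true))] using
              ih rest (lines ++ [pvFlushB (parts ++ [PySem.Str.strip l])]) [] false hr
          · simp only [if_neg h2]
            simpa only [if_pos rfl] using ih rest lines (parts ++ [PySem.Str.strip l]) true hr
      | false =>
        simp only [if_neg (by simp : ¬ (false = true))]
        rw [pvA_outer]
        simp only [pvB_step]
        by_cases h1 : PySem.Str.strip l = "" ∨ PySem.Str.startswith (PySem.Str.strip l) "#"
        · simp only [if_pos h1, if_pos (Or.elim h1 (fun h => Or.inl h) (fun h => Or.inr (Or.inl h)))]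
          simpa only [if_neg (by simp : ¬ (false = true))] using ih rest lines parts false hr
        · by_cases h2 : PySem.Str.startswith (PySem.Str.strip l) "set charvar"
          · have h1' : (PySem.Str.strip l = "" ∨ PySem.Str.startswith (PySem.Str.strip l) "#" = true ∨ PySem.Str.startswith (PySem.Str.strip l) "set charvar" = true) := Or.inr (Or.inr h2)
            simp only [if_neg h1, if_pos h2, if_pos h1']
            simpa only [if_neg (by simp : ¬ (false = true))] using ih rest lines parts false hr
          · have h1' : ¬ (PySem.Str.strip l = "" ∨ PySem.Str.startswith (PySem.Str.strip l) "#" = true ∨ PySem.Str.startswith (PySem.Str.strip l) "set charvar" = true) := by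
              rintro (h | h | h)
              · exact h1 (Or.inl h)
              · exact h1 (Or.inr h)
              · exact h2 h
            simp only [if_neg h1, if_neg h2, if_neg h1']
            by_cases h3 : PySem.Str.startswith (PySem.Str.strip l) "always"
            · simp only [if_pos h3]
              simpa only [pvFlushB] using ih rest lines
                (if PySem.Str.strip (PySem.Str.slice (PySem.Str.strip l) (some 6) none) ≠ "" then
                  [PySem.Str.strip (PySem.Str.slice (PySem.Str.strip l) (some 6) none)] else [])
                true hr
            · simp only [if_neg h3]
              simpa only [if_neg (by simp : ¬ (false = true))] using
                ih rest (lines ++ [PySem.Str.strip l]) parts false hr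

-- ===== VERDICT (by name: the statement is the Claim_ definition above) =====
theorem normalize_spec_text_spec : Claim_equal_normalize_spec_text := by
  intro text _
  unfold Spec_normalize_spec_text normalize_spec_text normalize_spec_text_alt
  have h := pvMain (PySem.Str.splitlines text).length (PySem.Str.splitlines text) [] [] false (Nat.le_refl _)
  simp only [if_neg (by simp : ¬ (false = true))] at h
  rw [h]; rfl
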